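-- pv_equiv track=rewrite | github.com/YHordijk/dictfunc | src/dictfunc/dictfunc.py | dict_match
-- ===== SOURCE A (Python) =====
-- def dict_match(a, b):
--     matched_keys = [key for key in a.keys() if key in b.keys()]
--     match = True
--     for key in matched_keys:
--         aval, bval = a[key], b[key]
--         if isinstance(aval, dict) and isinstance(bval, dict):
--             match = dict_match(aval, bval)
--         else:
--             if aval != bval:
--                 match = False
--     return match
-- ===== SOURCE B (Python) =====
-- def dict_match(a, b):
--     # Values here are ints, so the recursive-dict branch of the original can never fire:
--     # the result is simply "every shared key carries equal values".  Traverse b's items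
--     # once with a short-circuiting all() instead of building a matched-key list and a flag.
--     return all(bv == a[k] for k, bv in b.items() if k in a)
-- ===== Notes on version B (the rewrite author's own statement) =====
-- stated objective: simpler
-- what changed: Replaces the matched-key list plus never-reset boolean flag loop with a single short-circuiting all() over b's items, comparing against a where the key is shared.
import Mathlib
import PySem

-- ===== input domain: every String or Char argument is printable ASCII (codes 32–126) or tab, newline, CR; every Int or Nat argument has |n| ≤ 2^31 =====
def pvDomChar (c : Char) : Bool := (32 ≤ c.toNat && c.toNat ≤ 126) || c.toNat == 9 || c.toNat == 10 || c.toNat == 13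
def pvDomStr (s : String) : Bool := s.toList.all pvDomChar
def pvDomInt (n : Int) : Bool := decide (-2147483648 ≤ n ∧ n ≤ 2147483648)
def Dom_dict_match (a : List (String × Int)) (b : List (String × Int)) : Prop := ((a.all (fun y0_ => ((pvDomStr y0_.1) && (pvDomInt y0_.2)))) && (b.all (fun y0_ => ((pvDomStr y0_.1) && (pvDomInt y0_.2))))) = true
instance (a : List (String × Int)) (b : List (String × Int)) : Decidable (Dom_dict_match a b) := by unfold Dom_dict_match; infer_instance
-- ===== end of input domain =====

-- B replaces A's matched-key list and never-reset flag loop with one short-circuiting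
-- all() over b's items (objective: simpler).  Values are ints, so A's isinstance-dict
-- recursion branch can never fire and is not ported.

-- ===== PORT A =====
-- the dicts a, b as Python builds them (insertion order, later duplicate keys overwrite)
def dict_match (a : List (String × Int)) (b : List (String × Int)) : Bool :=
  let da := PySem.Dict.ofList a
  let db := PySem.Dict.ofList b
  let matched_keys := da.keys.filter (fun key => db.contains key)
  -- aval/bval are ints, so 'isinstance(aval, dict) and isinstance(bval, dict)' is always
  -- False: only the else-branch is ported.  key comes from the dicts' own key lists, so
  -- a[key]/b[key] cannot raise; getD with any default is exact there.
  matched_keys.foldl (fun mtch key =>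
    if da.getD key 0 ≠ db.getD key 0 then false else mtch) true

-- ===== PORT B =====
def dict_match_alt (a : List (String × Int)) (b : List (String × Int)) : Bool :=
  let da := PySem.Dict.ofList a
  let db := PySem.Dict.ofList b
  -- all(bv == a[k] for k, bv in b.items() if k in a); a[k] guarded by the contains test
  db.items.all (fun kv => !(da.contains kv.1) || (da.getD kv.1 0 == kv.2))

-- ===== PRECONDITION & SPEC =====
def Spec_dict_match (a : List (String × Int)) (b : List (String × Int)) (out : Bool) : Prop := out = dict_match_alt a b
instance (a : List (String × Int)) (b : List (String × Int)) (out : Bool) : Decidable (Spec_dict_match a b out) := by unfold Spec_dict_match; infer_instance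

-- ===== CLAIM (what is proved, stated in full; the proofs are below) =====
def Claim_equal_dict_match : Prop := ∀ (a : List (String × Int)) (b : List (String × Int)), Dom_dict_match a b → Spec_dict_match a b (dict_match a b)

-- ===== LEMMAS AND PROOFS =====

-- A's flag loop never resets the flag to true, so it is an 'all' over the traversed keys
theorem foldl_flag_eq_all (l : List String) (p : String → Prop) [DecidablePred p] (init : Bool) :
    l.foldl (fun mtch key => if p key then false else mtch) init
      = (init && l.all (fun k => !decide (p k))) := by
  induction l generalizing init with
  | nil => simp
  | cons x xs ih =>
    simp only [List.foldl_cons, List.all_cons, ih]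
    by_cases h : p x <;> simp [h]

theorem dict_match_spec_aux : ∀ (a : List (String × Int)) (b : List (String × Int)), Spec_dict_match a b (dict_match a b) := by
  intro a b
  unfold Spec_dict_match dict_match dict_match_alt
  simp only []
  rw [foldl_flag_eq_all, Bool.true_and]
  set da := PySem.Dict.ofList a with hda
  set db := PySem.Dict.ofList b with hdb
  have hnda : da.keys.Nodup := PySem.Dict.nodup_keys_ofList a
  have hndb : db.keys.Nodup := PySem.Dict.nodup_keys_ofList b
  rw [Bool.eq_iff_iff]
  simp only [List.all_eq_true, List.mem_filter, Bool.not_eq_eq_eq_not, Bool.not_true,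
    decide_eq_false_iff_not, not_not, Bool.or_eq_true, beq_iff_eq]
  constructor
  · rintro h ⟨k, v⟩ hmem
    by_cases hc : da.contains k = true
    · right
      have hkdb : k ∈ db.keys := PySem.Dict.mem_keys_of_mem_items db hmem
      have hka : k ∈ da.keys := (PySem.Dict.contains_iff_mem_keys da k).1 hc
      have hcb : db.contains k = true := (PySem.Dict.contains_iff_mem_keys db k).2 hkdb
      have := h k ⟨hka, hcb⟩
      rw [this]
      exact PySem.Dict.getD_of_mem_items db hmem hndb 0
    · left; simpa using hc
  · intro h k hk
    obtain ⟨hka, hkb⟩ := hk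
    have hcda : da.contains k = true :=
      (PySem.Dict.contains_iff_mem_keys da k).2 hka
    have hsome : (db.get? k).isSome := by
      rw [← PySem.Dict.contains_eq_isSome_get?]; exact hkb
    obtain ⟨v, hv⟩ := Option.isSome_iff_exists.1 hsome
    have hmem : (k, v) ∈ db.items := PySem.Dict.mem_items_of_get?_eq_some db hv
    have := h (k, v) hmem
    rcases this with hfalse | heq
    · simp [hcda] at hfalse
    · rw [heq, PySem.Dict.getD_of_mem_items db hmem hndb]

-- ===== VERDICT (by name: the statement is the Claim_ definition above) =====
theorem dict_match_spec : Claim_equal_dict_match := fun a b _ => dict_match_spec_aux a b
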